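-- pv_equiv track=rewrite | github.com/wuwei-crg/LXB-Framework | src/auto_map_builder/node_explorer.py | _extract_block_identifiers
-- ===== SOURCE A (Python) =====
-- from typing import List, Dict, Optional, Tuple, Set, Callable
--
-- def _extract_block_identifiers(xml_nodes: List[Dict]) -> List[str]:
--     """
--     从 XML 中提取 Block 页面的特征 identifiers
--
--     提取策略：
--     1. 优先提取包含关键词的 resource_id
--     2. 提取所有非空的 resource_id（去重，最多 10 个）
--     """
--     # Block 页面关键词
--     block_keywords = [
--         "captcha", "verify", "slider", "puzzle", "code",
--         "security", "risk", "check", "validate", "confirm",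
--         "login", "sign", "auth", "error", "retry"
--     ]
--
--     identifiers = []
--     all_ids = []
--
--     for node in xml_nodes:
--         rid = node.get("resource_id", "")
--         if not rid:
--             continue
--
--         # 只取 id 部分
--         short_id = rid.split("/")[-1] if "/" in rid else rid
--         if not short_id or short_id in all_ids:
--             continue
--
--         all_ids.append(short_id)
--
--         # 优先添加包含关键词的
--         rid_lower = short_id.lower()
--         for kw in block_keywords:
--             if kw in rid_lower:
--                 identifiers.append(short_id)
--                 break
--
--     # 如果关键词匹配的不够，补充其他 id
--     if len(identifiers) < 5:
--         for rid in all_ids: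
--             if rid not in identifiers:
--                 identifiers.append(rid)
--             if len(identifiers) >= 10:
--                 break
--
--     return identifiers[:10]  # 最多 10 个
-- ===== SOURCE B (Python) =====
-- from typing import List, Dict
--
-- _BLOCK_KEYWORDS = [
--     "captcha", "verify", "slider", "puzzle", "code",
--     "security", "risk", "check", "validate", "confirm",
--     "login", "sign", "auth", "error", "retry"
-- ]
--
-- def _is_block_kw(s: str) -> bool:
--     low = s.lower()
--     return any(kw in low for kw in _BLOCK_KEYWORDS)
--
-- def _extract_block_identifiers(xml_nodes: List[Dict]) -> List[str]:
--     # short ids of all nodes with a non-empty resource_id, in appearance order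
--     shorts = []
--     for node in xml_nodes:
--         rid = node.get("resource_id", "")
--         if rid:
--             shorts.append(rid.split("/")[-1] if "/" in rid else rid)
--     # ordered dedup, drop empty ids
--     all_ids = [s for s in dict.fromkeys(shorts) if s]
--     # stable sort: keyword ids first (key 0), others after (key 1); order inside groups kept
--     ranked = sorted(all_ids, key=lambda s: 0 if _is_block_kw(s) else 1)
--     k = sum(1 for s in ranked if _is_block_kw(s))
--     limit = 10 if k < 5 else min(k, 10)
--     return ranked[:limit]
-- ===== Notes on version B (the rewrite author's own statement) =====
-- stated objective: alternative
-- what changed: Replaces A's fused keyword-collecting loop plus membership-testing append-until-10 supplement loop with a pipeline: collect short ids, ordered dedup via dict.fromkeys, ONE stable sort by a boolean key (keyword ids ranked first), and a closed-form slice limit (10 if k<5 else min(k,10)) instead of any padding loop.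
import Mathlib
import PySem

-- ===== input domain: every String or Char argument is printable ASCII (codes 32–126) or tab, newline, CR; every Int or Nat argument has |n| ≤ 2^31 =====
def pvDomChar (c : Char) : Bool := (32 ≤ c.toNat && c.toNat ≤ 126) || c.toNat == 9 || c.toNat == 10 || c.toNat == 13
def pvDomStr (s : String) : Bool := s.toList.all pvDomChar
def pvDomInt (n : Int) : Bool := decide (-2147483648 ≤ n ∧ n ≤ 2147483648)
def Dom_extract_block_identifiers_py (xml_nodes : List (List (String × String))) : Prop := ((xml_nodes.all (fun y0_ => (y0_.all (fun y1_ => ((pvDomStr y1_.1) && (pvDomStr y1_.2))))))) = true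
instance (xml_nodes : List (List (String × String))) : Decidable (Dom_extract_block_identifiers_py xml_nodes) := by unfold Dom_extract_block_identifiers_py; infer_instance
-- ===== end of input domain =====

-- B replaces A's fused keyword-collecting loop + append-until-10 supplement loop by a pipeline:
-- ordered dedup, ONE stable sort by a boolean key (keyword ids first), closed-form slice limit.

def pvBlockKeywords : List String :=
  ["captcha", "verify", "slider", "puzzle", "code",
   "security", "risk", "check", "validate", "confirm",
   "login", "sign", "auth", "error", "retry"]

-- shared helper: rid.split("/")[-1] if "/" in rid else rid (identical expression in A and B)
def pvShortId (rid : String) : String :=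
  if PySem.Str.isIn "/" rid
  then PySem.List.pyGetD ((PySem.Str.split? rid "/").getD []) (-1) ""
  else rid

-- ===== PORT A =====
-- `for kw in block_keywords: if kw in rid_lower: identifiers.append(short_id); break`
def aKwLoop (kws : List String) (ridLower : String) (identifiers : List String) (shortId : String) : List String :=
  match kws with
  | [] => identifiers
  | kw :: rest =>
    if PySem.Str.isIn kw ridLower then identifiers ++ [shortId]
    else aKwLoop rest ridLower identifiers shortId

-- the body of A's first `for node in xml_nodes` loop; state = (identifiers, all_ids)
def aStep (state : List String × List String) (node : List (String × String)) : List String × List String :=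
  let rid := PySem.Dict.getD (PySem.Dict.mk node) "resource_id" ""
  if rid = "" then state
  else
    let shortId := pvShortId rid
    if shortId = "" ∨ shortId ∈ state.2 then state
    else (aKwLoop pvBlockKeywords (PySem.Str.lower shortId) state.1 shortId, state.2 ++ [shortId])

-- `for rid in all_ids: if rid not in identifiers: identifiers.append(rid); if len(identifiers) >= 10: break`
def aFill (allIds : List String) (identifiers : List String) : List String :=
  match allIds with
  | [] => identifiers
  | r :: rest =>
    let ids' := if r ∈ identifiers then identifiers else identifiers ++ [r]
    if 10 ≤ ids'.length then ids' else aFill rest ids'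

def extract_block_identifiers_py (xml_nodes : List (List (String × String))) : List String :=
  let st := xml_nodes.foldl aStep ([], [])
  let ids := if st.1.length < 5 then aFill st.2 st.1 else st.1
  ids.take 10

-- ===== PORT B =====
def isKwB (s : String) : Bool :=
  pvBlockKeywords.any (fun kw => PySem.Str.isIn kw (PySem.Str.lower s))

def extract_block_identifiers_py_alt (xml_nodes : List (List (String × String))) : List String :=
  let shorts := xml_nodes.foldl (fun acc node =>
      let rid := PySem.Dict.getD (PySem.Dict.mk node) "resource_id" ""
      if rid ≠ "" then acc ++ [pvShortId rid] else acc) []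
  let allIds := (PySem.List.dedup shorts).filter (fun s => s ≠ "")
  let ranked := PySem.List.sorted allIds (fun s => if isKwB s then (0 : Nat) else 1) false
  let k := ranked.countP isKwB
  let limit := if k < 5 then 10 else min k 10
  ranked.take limit

-- ===== PRECONDITION & SPEC =====
def Spec_extract_block_identifiers_py (xml_nodes : List (List (String × String))) (out : List String) : Prop := out = extract_block_identifiers_py_alt xml_nodes
instance (xml_nodes : List (List (String × String))) (out : List String) : Decidable (Spec_extract_block_identifiers_py xml_nodes out) := by unfold Spec_extract_block_identifiers_py; infer_instance

-- ===== CLAIM (what is proved, stated in full; the proofs are below) =====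
def Claim_equal_extract_block_identifiers_py : Prop := ∀ (xml_nodes : List (List (String × String))), Dom_extract_block_identifiers_py xml_nodes → Spec_extract_block_identifiers_py xml_nodes (extract_block_identifiers_py xml_nodes)

-- ===== LEMMAS AND PROOFS =====

-- the list of short ids A/B scan, as a structural recursion (proof-only helper)
def shortsRec : List (List (String × String)) → List String
  | [] => []
  | node :: rest =>
    let rid := PySem.Dict.getD (PySem.Dict.mk node) "resource_id" ""
    if rid = "" then shortsRec rest else pvShortId rid :: shortsRec rest

-- A's all_ids accumulator, isolated (proof-only helper)
def buildIds : List (List (String × String)) → List String → List String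
  | [], acc => acc
  | node :: rest, acc =>
    let rid := PySem.Dict.getD (PySem.Dict.mk node) "resource_id" ""
    if rid = "" then buildIds rest acc
    else
      let sid := pvShortId rid
      if sid = "" ∨ sid ∈ acc then buildIds rest acc
      else buildIds rest (acc ++ [sid])

theorem aKwLoop_eq (kws : List String) (rl : String) (ids : List String) (sid : String) :
    aKwLoop kws rl ids sid = if kws.any (fun kw => PySem.Str.isIn kw rl) then ids ++ [sid] else ids := by
  induction kws with
  | nil => simp [aKwLoop]
  | cons kw rest ih =>
    simp only [aKwLoop, List.any_cons, Bool.or_eq_true]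
    by_cases h : PySem.Str.isIn kw rl = true
    · rw [if_pos h, if_pos (Or.inl h)]
    · rw [if_neg h, ih]
      by_cases h2 : (rest.any fun kw => PySem.Str.isIn kw rl) = true
      · rw [if_pos h2, if_pos (Or.inr h2)]
      · rw [if_neg h2, if_neg (by tauto)]

-- A's first loop keeps identifiers = all_ids.filter isKwB while accumulating all_ids = buildIds
theorem loopA_eq (nodes : List (List (String × String))) (acc : List String) :
    nodes.foldl aStep (acc.filter isKwB, acc)
      = ((buildIds nodes acc).filter isKwB, buildIds nodes acc) := by
  induction nodes generalizing acc with
  | nil => simp [buildIds]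
  | cons node rest ih =>
    simp only [List.foldl_cons, buildIds, aStep]
    by_cases hrid : PySem.Dict.getD (PySem.Dict.mk node) "resource_id" "" = ""
    · rw [if_pos hrid, if_pos hrid]; exact ih acc
    · rw [if_neg hrid, if_neg hrid]
      set sid := pvShortId (PySem.Dict.getD (PySem.Dict.mk node) "resource_id" "") with hsiddef
      by_cases hskip : sid = "" ∨ sid ∈ acc
      · rw [if_pos hskip, if_pos hskip]; exact ih acc
      · rw [if_neg hskip, if_neg hskip]
        have hids : aKwLoop pvBlockKeywords (PySem.Str.lower sid) (acc.filter isKwB) sid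
            = (acc ++ [sid]).filter isKwB := by
          rw [aKwLoop_eq, List.filter_append]
          by_cases h : isKwB sid = true
          · have h' := h; simp only [isKwB] at h'; rw [if_pos h']; simp [h]
          · have h' := h; simp only [isKwB] at h'; rw [if_neg h']; simp [h]
        rw [hids]; exact ih (acc ++ [sid])

theorem buildIds_nodup (nodes : List (List (String × String))) (acc : List String)
    (hnd : acc.Nodup) : (buildIds nodes acc).Nodup := by
  induction nodes generalizing acc with
  | nil => simpa [buildIds]
  | cons node rest ih =>
    simp only [buildIds]
    split
    · exact ih acc hnd
    · split
      · exact ih acc hnd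
      · next h =>
        refine ih _ (List.Nodup.append hnd (List.nodup_singleton _) ?_)
        intro a ha hb
        simp only [List.mem_singleton] at hb
        subst hb
        exact (not_or.mp h).2 ha

-- B's shorts loop equals shortsRec
theorem shorts_foldl_eq (nodes : List (List (String × String))) (acc : List String) :
    nodes.foldl (fun acc node =>
        let rid := PySem.Dict.getD (PySem.Dict.mk node) "resource_id" ""
        if rid ≠ "" then acc ++ [pvShortId rid] else acc) acc
      = acc ++ shortsRec nodes := by
  induction nodes generalizing acc with
  | nil => simp [shortsRec]
  | cons node rest ih =>
    simp only [List.foldl_cons]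
    rw [ih]
    by_cases hrid : PySem.Dict.getD (PySem.Dict.mk node) "resource_id" "" = ""
    · simp [shortsRec, hrid]
    · simp [shortsRec, hrid, List.append_assoc]

-- A's dedup-by-membership equals B's set-fold dedup followed by dropping ""
theorem buildIds_eq_setfold (nodes : List (List (String × String))) (acc seen : List String)
    (hf : seen.filter (fun s => s ≠ "") = acc) :
    buildIds nodes acc = ((shortsRec nodes).foldl PySem.Set.add seen).filter (fun s => s ≠ "") := by
  induction nodes generalizing acc seen with
  | nil =>
    simp only [buildIds, shortsRec, List.foldl_nil]
    simpa using hf.symm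
  | cons node rest ih =>
    simp only [buildIds, shortsRec]
    by_cases hrid : PySem.Dict.getD (PySem.Dict.mk node) "resource_id" "" = ""
    · rw [if_pos hrid, if_pos hrid]; exact ih acc seen hf
    · rw [if_neg hrid, if_neg hrid]
      set sid := pvShortId (PySem.Dict.getD (PySem.Dict.mk node) "resource_id" "") with hsiddef
      simp only [List.foldl_cons]
      by_cases hsid0 : sid = ""
      · rw [if_pos (Or.inl hsid0)]
        refine ih acc (PySem.Set.add seen sid) ?_
        simp only [PySem.Set.add]
        split
        · exact hf
        · rw [List.filter_append, hf]; simp [hsid0]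
      · by_cases hmem : sid ∈ acc
        · rw [if_pos (Or.inr hmem)]
          have hseen : sid ∈ seen := by
            have := hf ▸ hmem; exact List.mem_of_mem_filter this
          have : PySem.Set.add seen sid = seen := by
            simp [PySem.Set.add, PySem.Set.contains, hseen]
          rw [this]; exact ih acc seen hf
        · rw [if_neg (by tauto)]
          have hseen : sid ∉ seen := by
            intro h
            exact hmem (hf ▸ List.mem_filter.mpr ⟨h, by simpa using hsid0⟩)
          have : PySem.Set.add seen sid = seen ++ [sid] := by
            simp [PySem.Set.add, PySem.Set.contains, hseen]
          rw [this]
          refine ih (acc ++ [sid]) (seen ++ [sid]) ?_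
          rw [List.filter_append, hf]; simp [hsid0]

-- stable insertion with a 0/1 key into a partitioned list
theorem insertBy_key (x : String) (F G : List String)
    (hF : ∀ y ∈ F, isKwB y = true) (hG : ∀ y ∈ G, isKwB y = false) :
    PySem.List.insertBy
      (fun a b => decide ((if isKwB a then (0 : Nat) else 1) < (if isKwB b then (0 : Nat) else 1)))
      x (F ++ G)
    = if isKwB x then F ++ x :: G else (F ++ G) ++ [x] := by
  by_cases hx : isKwB x = true
  · rw [if_pos hx]
    induction F with
    | nil =>
      cases G with
      | nil => simp [PySem.List.insertBy]
      | cons g gs =>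
        have hg := hG g (by simp)
        simp [PySem.List.insertBy, hx, hg]
    | cons f F' ihF =>
      have hf := hF f (by simp)
      have hrest := ihF (fun y hy => hF y (by simp [hy]))
      simp [PySem.List.insertBy, hf, hx, hrest]
  · rw [if_neg hx]
    have hx0 : isKwB x = false := Bool.eq_false_iff.mpr hx
    refine PySem.List.insertBy_of_forall_not_before _ x (F ++ G) ?_
    intro y _
    simp only [hx0, Bool.false_eq_true, if_false]
    split <;> simp

-- the sort loop keeps the two groups, new elements appended at their group's back
theorem foldl_ins (xs F G : List String)
    (hF : ∀ y ∈ F, isKwB y = true) (hG : ∀ y ∈ G, isKwB y = false) :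
    xs.foldl (fun acc x => PySem.List.insertBy
        (fun a b => decide ((if isKwB a then (0 : Nat) else 1) < (if isKwB b then (0 : Nat) else 1)))
        x acc) (F ++ G)
      = (F ++ xs.filter isKwB) ++ (G ++ xs.filter (fun s => !isKwB s)) := by
  induction xs generalizing F G with
  | nil => simp
  | cons x rest ih =>
    simp only [List.foldl_cons]
    rw [insertBy_key x F G hF hG]
    by_cases hx : isKwB x = true
    · rw [if_pos hx]
      have : F ++ x :: G = (F ++ [x]) ++ G := by simp
      rw [this, ih (F ++ [x]) G
          (fun y hy => by rcases List.mem_append.mp hy with h | h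
                          · exact hF y h
                          · simp only [List.mem_singleton] at h; subst h; exact hx) hG]
      simp [hx, List.append_assoc]
    · rw [if_neg hx]
      have hx0 : isKwB x = false := Bool.eq_false_iff.mpr hx
      have : (F ++ G) ++ [x] = F ++ (G ++ [x]) := by simp
      rw [this, ih F (G ++ [x]) hF
          (fun y hy => by rcases List.mem_append.mp hy with h | h
                          · exact hG y h
                          · simp only [List.mem_singleton] at h; subst h; exact hx0)]
      simp [hx0, List.append_assoc]

-- sorted with the boolean key IS the partition
theorem sorted_boolkey (xs : List String) :
    PySem.List.sorted xs (fun s => if isKwB s then (0 : Nat) else 1) false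
      = xs.filter isKwB ++ xs.filter (fun s => !isKwB s) := by
  rw [PySem.List.sorted_eq_foldl_insertBy]
  have := foldl_ins xs [] [] (by simp) (by simp)
  simpa using this

theorem aFill_eq (l : List String) (acc : List String)
    (hnd : l.Nodup) (hmem : ∀ r ∈ l, (r ∈ acc ↔ isKwB r = true)) (hlen : acc.length < 10) :
    aFill l acc = acc ++ (l.filter (fun s => !isKwB s)).take (10 - acc.length) := by
  induction l generalizing acc with
  | nil => simp [aFill]
  | cons r rest ih =>
    simp only [aFill, List.filter_cons]
    by_cases hk : isKwB r = true
    · have hr : r ∈ acc := (hmem r (by simp)).mpr hk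
      rw [if_pos hr, if_neg (by omega : ¬ 10 ≤ acc.length)]
      simp only [hk, Bool.not_true, if_neg (by simp : ¬ (false = true))]
      exact ih acc hnd.of_cons (fun x hx => hmem x (List.mem_cons_of_mem _ hx)) hlen
    · have hr : r ∉ acc := fun h => hk ((hmem r (by simp)).mp h)
      rw [if_neg hr]
      simp only [hk, Bool.not_false]
      have hlen' : (acc ++ [r]).length = acc.length + 1 := by simp
      by_cases hten : 10 ≤ (acc ++ [r]).length
      · rw [if_pos hten]
        have h9 : acc.length = 9 := by omega
        have : 10 - acc.length = 1 := by omega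
        simp [this]
      · rw [if_neg hten]
        have hrec := ih (acc ++ [r]) hnd.of_cons
          (fun x hx => by
            have hne : x ≠ r := fun he => (List.nodup_cons.mp hnd).1 (he ▸ hx)
            rw [List.mem_append, List.mem_singleton]
            simp [hne, hmem x (List.mem_cons_of_mem _ hx)])
          (by omega)
        rw [hrec]
        have h10 : 10 - acc.length = (10 - (acc ++ [r]).length) + 1 := by
          rw [hlen']; omega
        rw [h10]
        simp [List.take_succ_cons]

-- final arithmetic: A's pad-then-truncate equals B's closed-form slice of F ++ G
theorem final_eq (all : List String) (hnd : all.Nodup) :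
    (if (all.filter isKwB).length < 5 then aFill all (all.filter isKwB) else all.filter isKwB).take 10
      = ((all.filter isKwB) ++ (all.filter (fun s => !isKwB s))).take
          (if (all.filter isKwB).length < 5 then 10 else min (all.filter isKwB).length 10) := by
  set F := all.filter isKwB with hFdef
  set G := all.filter (fun s => !isKwB s) with hGdef
  by_cases h5 : F.length < 5
  · rw [if_pos h5, if_pos h5]
    rw [aFill_eq all F hnd
        (fun r hr => ⟨fun hrk => (List.mem_filter.mp hrk).2, fun hk => List.mem_filter.mpr ⟨hr, hk⟩⟩)
        (by omega)]
    have hFle : F.length ≤ 10 := by omega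
    have hlenle : (F ++ G.take (10 - F.length)).length ≤ 10 := by
      have := List.length_take_le (10 - F.length) G
      simp only [List.length_append]; omega
    rw [List.take_of_length_le hlenle, List.take_append, List.take_of_length_le hFle]
  · rw [if_neg h5, if_neg h5]
    rw [List.take_append]
    have h0 : min F.length 10 - F.length = 0 := by omega
    rw [h0, List.take_zero, List.append_nil]
    by_cases hle : F.length ≤ 10
    · have : min F.length 10 = F.length := by omega
      rw [this, List.take_length, List.take_of_length_le hle]
    · have : min F.length 10 = 10 := by omega
      rw [this]

-- ===== VERDICT (by name: the statement is the Claim_ definition above) =====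
theorem extract_block_identifiers_py_spec : Claim_equal_extract_block_identifiers_py := by
  intro xml_nodes _
  unfold Spec_extract_block_identifiers_py
  have hloop := loopA_eq xml_nodes []
  simp only [List.filter_nil] at hloop
  have hall : buildIds xml_nodes []
      = ((PySem.List.dedup (shortsRec xml_nodes)).filter (fun s => s ≠ "")) := by
    rw [buildIds_eq_setfold xml_nodes [] [] (by simp)]
    simp [PySem.List.dedup, PySem.Set.ofList, PySem.Set.empty]
  have hnd : (buildIds xml_nodes []).Nodup := buildIds_nodup xml_nodes [] List.nodup_nil
  simp only [extract_block_identifiers_py, extract_block_identifiers_py_alt, hloop,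
    shorts_foldl_eq, List.nil_append]
  rw [← hall, sorted_boolkey]
  rw [List.countP_append, List.countP_eq_length.mpr (fun a ha => by
        simpa using (List.mem_filter.mp ha).2),
      (List.countP_eq_zero).mpr (fun a ha => by
        have := (List.mem_filter.mp ha).2; simp_all)]
  simpa using final_eq (buildIds xml_nodes []) hnd
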